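-- pv_equiv track=rewrite | github.com/wangwenju269/leetcode | 滑动数组单调栈贪心算法/954. 二倍数对数组.py | process
-- ===== SOURCE A (Python) =====
-- from collections import Counter
--
-- def process(arr):
--     hash_map = Counter(arr)
--     arr.sort(key = abs)
--     for num in arr:
--         if hash_map[num] == 0:
--            continue
--         if hash_map[num * 2] == 0:
--            return False
--         else:
--            hash_map[num * 2] -= 1
--            hash_map[num] -= 1
--     return True
-- ===== SOURCE B (Python) =====
-- from collections import Counter
--
-- def process(arr):
--     cnt = Counter(arr)
--     arr.sort(key=abs)          # keep A's observable in-place sort of arr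
--     for x in sorted(cnt, key=abs, reverse=True):
--         if cnt[x] == 0:
--             continue
--         if x % 2 or cnt[x // 2] < cnt[x]:
--             return False
--         cnt[x // 2] -= cnt[x]
--     return True
-- ===== Notes on version B (the rewrite author's own statement) =====
-- stated objective: alternative
-- what changed: A scans the abs-sorted array element by element, pairing each remaining element upward with one copy of its double (cnt[2*x] -= 1); B instead walks the distinct values in DECREASING absolute value and pairs each whole count downward with its half (parity test on x, bulk check cnt[x//2] >= cnt[x], bulk subtraction), a reverse greedy over keys rather than a forward greedy over elements.
import Mathlib
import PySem

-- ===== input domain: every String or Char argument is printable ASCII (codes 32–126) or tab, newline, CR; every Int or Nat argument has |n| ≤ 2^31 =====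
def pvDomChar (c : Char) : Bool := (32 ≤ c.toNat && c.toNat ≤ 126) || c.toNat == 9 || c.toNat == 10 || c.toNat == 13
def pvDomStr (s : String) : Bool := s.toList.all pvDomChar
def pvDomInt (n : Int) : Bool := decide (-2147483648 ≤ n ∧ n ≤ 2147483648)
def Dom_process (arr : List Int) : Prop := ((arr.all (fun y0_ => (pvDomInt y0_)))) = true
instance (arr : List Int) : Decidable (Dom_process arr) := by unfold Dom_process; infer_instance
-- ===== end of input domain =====

-- B walks the DISTINCT values in decreasing absolute value and pairs each whole count downward
-- with its half (parity test, bulk comparison and bulk subtraction), instead of A's per-element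
-- forward scan that pairs each element upward with one copy of its double; objective: alternative.
-- Both A and B sort the argument in place by absolute value (same observable mutation); the
-- equivalence proved here is about the return value.

-- ===== PORT A =====
def processGo : List Int → PySem.Dict Int Int → Bool
  | [], _ => true
  | num :: rest, m =>
    if m.getD num 0 = 0 then processGo rest m
    else if m.getD (num * 2) 0 = 0 then false
    else processGo rest ((m.modify (num * 2) 0 (· - 1)).modify num 0 (· - 1))

def process (arr : List Int) : Bool :=
  let hashMap := PySem.Dict.counter arr
  processGo (PySem.List.sorted arr (fun x => |x|)) hashMap

-- ===== PORT B =====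
def processAltGo : List Int → PySem.Dict Int Int → Bool
  | [], _ => true
  | x :: rest, cnt =>
    if cnt.getD x 0 = 0 then processAltGo rest cnt
    else if PySem.Int.mod x 2 ≠ 0 then false
    else if cnt.getD (PySem.Int.floordiv x 2) 0 < cnt.getD x 0 then false
    else processAltGo rest (cnt.modify (PySem.Int.floordiv x 2) 0 (· - cnt.getD x 0))

def process_alt (arr : List Int) : Bool :=
  let cnt := PySem.Dict.counter arr
  processAltGo (PySem.List.sorted cnt.keys (fun x => |x|) true) cnt

-- ===== PRECONDITION & SPEC =====
def Spec_process (arr : List Int) (out : Bool) : Prop := out = process_alt arr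
instance (arr : List Int) (out : Bool) : Decidable (Spec_process arr out) := by unfold Spec_process; infer_instance

-- ===== CLAIM (what is proved, stated in full; the proofs are below) =====
def Claim_equal_process : Prop := ∀ (arr : List Int), Dom_process arr → Spec_process arr (process arr)

-- ===== LEMMAS AND PROOFS =====

-- Function-level versions of the two loops (state = the counter as a function Int → Int).
def stepA (f : Int → Int) (n : Int) : Int → Int :=
  let f1 := Function.update f (n * 2) (f (n * 2) - 1)
  Function.update f1 n (f1 n - 1)

def loopF : List Int → (Int → Int) → Bool
  | [], _ => true
  | n :: t, f =>
    if f n = 0 then loopF t f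
    else if f (n * 2) = 0 then false
    else loopF t (stepA f n)

def loopG : List Int → (Int → Int) → Bool
  | [], _ => true
  | x :: t, f =>
    if f x > f (2 * x) then false
    else loopG t (Function.update f (2 * x) (f (2 * x) - f x))

def loopH : List Int → (Int → Int) → Bool
  | [], _ => true
  | x :: t, f =>
    if f x = 0 then loopH t f
    else if PySem.Int.mod x 2 ≠ 0 then false
    else if f (PySem.Int.floordiv x 2) < f x then false
    else loopH t (Function.update f (PySem.Int.floordiv x 2) (f (PySem.Int.floordiv x 2) - f x))

-- keys a run of the loop on L can read
def touched (L : List Int) (w : Int) : Prop := ∃ n ∈ L, w = n ∨ w = 2 * n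

def touchedH (L : List Int) (w : Int) : Prop := ∃ y ∈ L, w = y ∨ (∃ z, y = 2 * z ∧ w = z)

-- the one-dimensional carry check both greedy passes compute on one chain of counts
def ok : Int → Int → List Int → Bool
  | a, b, [] => a == b
  | a, b, c :: cs => if a > c then false else ok (c - a) b cs

-- odd part of an integer (0 for 0)
def oddPart (x : Int) : Int :=
  if _h : x = 0 then 0
  else if _h2 : x % 2 = 0 then oddPart (x / 2)
  else x
termination_by x.natAbs
decreasing_by
  have h3 := Int.ediv_add_emod x 2
  omega

-- padded count list of a chain, ascending, relative to an anchor below it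
def pc (f : Int → Int) : Int → List Int → List Int
  | _, [] => []
  | x, y :: t => (if y = 2 * x then ([] : List Int) else [0]) ++ f y :: pc f y t

-- padded count list of a chain, descending, relative to an anchor above it
def pcD (f : Int → Int) : Int → List Int → List Int
  | _, [] => []
  | x, y :: t => (if x = 2 * y then ([] : List Int) else [0]) ++ f y :: pcD f y t

def fullC (f : Int → Int) : List Int → List Int
  | [] => []
  | x :: t => f x :: pc f x t

def fullD (f : Int → Int) : List Int → List Int
  | [] => []
  | x :: t => f x :: pcD f x t

theorem loopF_congr_aux {L : List Int} {f g : Int → Int}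
    (h : ∀ w, f w = g w) : loopF L f = loopF L g := by
  have : f = g := funext h
  rw [this]

theorem processGo_eq_loopF (L : List Int) (m : PySem.Dict Int Int) :
    processGo L m = loopF L (fun v => m.getD v 0) := by
  induction L generalizing m with
  | nil => rfl
  | cons num rest ih =>
    show (if m.getD num 0 = 0 then _ else _) = (if m.getD num 0 = 0 then _ else _)
    split_ifs with h1 h2
    · exact ih m
    · rfl
    · rw [ih]
      apply loopF_congr_aux
      intro v
      simp only [stepA, Function.update_apply, PySem.Dict.getD_modify]

theorem loopF_congr {L : List Int} {f g : Int → Int}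
    (h : ∀ w, touched L w → f w = g w) : loopF L f = loopF L g := by
  induction L generalizing f g with
  | nil => rfl
  | cons n t ih =>
    have hn : f n = g n := h n ⟨n, List.mem_cons_self .., Or.inl rfl⟩
    have hn2 : f (n * 2) = g (n * 2) := by
      rw [mul_comm]; exact h (2 * n) ⟨n, List.mem_cons_self .., Or.inr rfl⟩
    have ht : ∀ w, touched t w → f w = g w := by
      rintro w ⟨y, hy, hw⟩; exact h w ⟨y, List.mem_cons_of_mem _ hy, hw⟩
    show (if f n = 0 then _ else _) = (if g n = 0 then _ else _)
    rw [← hn, ← hn2]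
    split_ifs with h1 h2
    · exact ih ht
    · rfl
    · refine ih ?_
      rintro w ⟨y, hy, hw⟩
      simp only [stepA, Function.update_apply]
      split_ifs <;> first
        | rw [hn] | rw [hn2] | exact ht w ⟨y, hy, hw⟩

theorem stepA_apply_ne (f : Int → Int) (n w : Int) (h1 : w ≠ n) (h2 : w ≠ n * 2) :
    stepA f n w = f w := by
  simp [stepA, Function.update_apply, h1, h2]

theorem loopF_zeros (z : Nat) (t : List Int) (f : Int → Int) (ht : (0:Int) ∉ t) :
    loopF (List.replicate z 0 ++ t) f = loopF t f := by
  induction z generalizing f with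
  | zero => simp
  | succ z ih =>
    have hrw : List.replicate (z+1) (0:Int) ++ t = 0 :: (List.replicate z 0 ++ t) := by
      simp [List.replicate_succ]
    rw [hrw]
    simp only [loopF]
    split_ifs with h1 h2
    · exact ih f
    · exact absurd (by rw [zero_mul] at h2; exact h2) h1
    · rw [ih (stepA f 0)]
      apply loopF_congr
      rintro w ⟨y, hy, hw⟩
      have hy0 : y ≠ 0 := fun h => ht (h ▸ hy)
      have hw0 : w ≠ 0 := by
        rcases hw with rfl | rfl
        · exact hy0
        · exact mul_ne_zero two_ne_zero hy0
      exact stepA_apply_ne f 0 w hw0 (by simpa using hw0)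

-- a contiguous block of k copies of x behaves like one bulk step
theorem loopF_block (x : Int) (t : List Int) (hx : x ≠ 0) :
    ∀ (k : Nat) (f : Int → Int), 0 ≤ f x → f x ≤ (k : Int) → 0 ≤ f (x * 2) →
    loopF (List.replicate k x ++ t) f =
      (if f x > f (x * 2) then false
       else loopF t (Function.update (Function.update f (x * 2) (f (x * 2) - f x)) x 0)) := by
  have hne1 : ¬ (x = x * 2) := by omega
  have hne2 : ¬ (x * 2 = x) := by omega
  intro k
  induction k with
  | zero =>
    intro f h1 h2 h3
    have hfx : f x = 0 := le_antisymm h2 h1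
    rw [if_neg (by omega)]
    simp only [List.replicate, List.nil_append]
    apply loopF_congr_aux
    intro w
    by_cases hwx : w = x
    · simp [Function.update_apply, hwx, hfx]
    · by_cases hw2 : w = x * 2
      · simp [hw2, hfx, hne2]
      · simp [hwx, hw2]
  | succ k ih =>
    intro f h1 h2 h3
    have hrw : List.replicate (k+1) x ++ t = x :: (List.replicate k x ++ t) := by
      simp [List.replicate_succ]
    rw [hrw]
    simp only [loopF]
    by_cases hz : f x = 0
    · rw [if_pos hz, ih f h1 (by omega) h3]
    · rw [if_neg hz]
      by_cases hz2 : f (x * 2) = 0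
      · rw [if_pos hz2, if_pos (by omega)]
      · rw [if_neg hz2]
        have sA_x : stepA f x x = f x - 1 := by
          simp [stepA, hne1]
        have sA_2x : stepA f x (x * 2) = f (x * 2) - 1 := by
          simp [stepA, Function.update_apply, hne2]
        rw [ih (stepA f x) (by rw [sA_x]; omega) (by rw [sA_x]; omega)
              (by rw [sA_2x]; omega)]
        by_cases hg : f x > f (x * 2)
        · rw [if_pos (by rw [sA_x, sA_2x]; omega), if_pos hg]
        · rw [if_neg (by rw [sA_x, sA_2x]; omega), if_neg hg]
          apply loopF_congr_aux
          intro w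
          by_cases hwx : w = x
          · simp [Function.update_apply, hwx]
          · by_cases hw2 : w = x * 2
            · simp [Function.update_apply, hw2, sA_x, sA_2x, hne2]
              try ring
            · simp [hwx, hw2, stepA_apply_ne f x w hwx hw2]

-- in a list sorted by |·| whose |·|-ties are equalities, equal elements are contiguous
theorem contig (x : Int) (t : List Int)
    (hp : (x :: t).Pairwise (fun a b => |a| ≤ |b|))
    (hties : ∀ y ∈ t, |y| = |x| → y = x) :
    t = List.replicate (t.count x) x ++ t.filter (fun y => decide (y ≠ x)) := by
  induction t with
  | nil => simp
  | cons y t' ih =>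
    rcases List.pairwise_cons.mp hp with ⟨hx_all, hp'⟩
    by_cases hy : y = x
    · subst hy
      have e := ih (List.pairwise_cons.mpr ⟨fun b hb => hx_all b (List.mem_cons_of_mem _ hb),
          (List.pairwise_cons.mp hp').2⟩)
          (fun z hz hz2 => hties z (List.mem_cons_of_mem _ hz) hz2)
      rw [List.count_cons_self, List.replicate_succ]
      have hf : (y :: t').filter (fun z => decide (z ≠ y)) = t'.filter (fun z => decide (z ≠ y)) := by
        simp
      rw [hf, List.cons_append]
      exact congrArg (y :: ·) e
    · have hxn : x ∉ y :: t' := by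
        intro hmem
        rcases List.mem_cons.mp hmem with h | h
        · exact hy h.symm
        · have h1 : |y| ≤ |x| := (List.pairwise_cons.mp hp').1 x h
          have h2 : |x| ≤ |y| := hx_all y (List.mem_cons_self ..)
          exact hy (hties y (List.mem_cons_self ..) (le_antisymm h1 h2))
      have hc : (y :: t').count x = 0 := List.count_eq_zero.mpr hxn
      have hf : (y :: t').filter (fun z => decide (z ≠ x)) = y :: t' :=
        List.filter_eq_self.mpr (by
          intro a ha
          simp only [decide_eq_true_eq]
          exact fun h => hxn (h ▸ ha))
      rw [hc, hf]
      rfl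

theorem ofList_sublist (S : List Int) : (PySem.Set.ofList S).Sublist S := by
  induction S with
  | nil => simp [PySem.Set.ofList_nil]
  | cons x xs ih =>
    rw [PySem.Set.ofList_cons]
    exact List.Sublist.cons₂ x (List.filter_sublist.trans ih)

theorem ofList_filter (S : List Int) (p : Int → Bool) :
    (PySem.Set.ofList S).filter p = PySem.Set.ofList (S.filter p) := by
  induction S with
  | nil => rfl
  | cons x xs ih =>
    rw [PySem.Set.ofList_cons]
    by_cases hp : p x
    · have e1 : (x :: (PySem.Set.ofList xs).discard x).filter p
          = x :: ((PySem.Set.ofList xs).discard x).filter p := by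
        simp [hp]
      have e2 : (x :: xs).filter p = x :: xs.filter p := by simp [hp]
      rw [e1, e2, PySem.Set.ofList_cons, ← ih]
      congr 1
      simp only [PySem.Set.discard]
      rw [List.filter_filter, List.filter_filter]
      exact List.filter_congr (fun a _ => Bool.and_comm ..)
    · have e1 : (x :: (PySem.Set.ofList xs).discard x).filter p
          = ((PySem.Set.ofList xs).discard x).filter p := by
        simp [hp]
      have e2 : (x :: xs).filter p = xs.filter p := by simp [hp]
      rw [e1, e2, ← ih]
      simp only [PySem.Set.discard]
      rw [List.filter_filter]
      exact List.filter_congr (fun a _ => by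
        by_cases hax : a = x
        · subst hax; simp [hp]
        · simp [hax])

theorem ofList_rep (m : Nat) (x : Int) (t : List Int) (hx : x ∉ t) :
    PySem.Set.ofList (List.replicate (m + 1) x ++ t) = x :: PySem.Set.ofList t := by
  have hdt : (PySem.Set.ofList t).discard x = PySem.Set.ofList t := by
    apply List.filter_eq_self.mpr
    intro a ha
    have : a ∈ t := (PySem.Set.mem_ofList ..).mp ha
    simp only [ne_eq, Bool.not_eq_eq_eq_not, Bool.not_true, beq_eq_false_iff_ne]
    exact fun h => hx (h ▸ this)
  induction m with
  | zero =>
    rw [show List.replicate 1 x ++ t = x :: t by simp, PySem.Set.ofList_cons, hdt]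
  | succ m ih =>
    rw [show List.replicate (m+2) x ++ t = x :: (List.replicate (m+1) x ++ t) by
          simp [List.replicate_succ],
        PySem.Set.ofList_cons, ih]
    simp only [PySem.Set.discard, List.filter_cons]
    rw [if_neg (by simp)]
    rw [show (PySem.Set.ofList t).filter (fun y => !y == x) = (PySem.Set.ofList t).discard x from rfl, hdt]

-- the heart of the A side: A's scan over a sorted, tie-free list = a bulk pass over its distinct values
theorem loopFG : ∀ (N : Nat) (L : List Int) (f : Int → Int), L.length ≤ N →
    L.Pairwise (fun a b => |a| ≤ |b|) →
    (∀ a ∈ L, ∀ b ∈ L, |a| = |b| → a = b) →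
    (0:Int) ∉ L →
    (∀ w : Int, w ≠ 0 → 0 ≤ f w) →
    (∀ x ∈ L, f x ≤ (L.count x : Int)) →
    loopF L f = loopG (PySem.Set.ofList L) f := by
  intro N
  induction N with
  | zero =>
    intro L f hlen _ _ _ _ _
    have : L = [] := List.eq_nil_of_length_eq_zero (Nat.le_zero.mp hlen)
    subst this
    rfl
  | succ N ih =>
    intro L f hlen hp hties h0 hpos hbd
    match L, hlen, hp, hties, h0, hbd with
    | [], _, _, _, _, _ => rfl
    | x :: t, hlen, hp, hties, h0, hbd =>
      have hties_t : ∀ y ∈ t, |y| = |x| → y = x := fun y hy h =>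
        hties y (List.mem_cons_of_mem _ hy) x (List.mem_cons_self ..) h
      have hct := contig x t hp hties_t
      have hx0 : x ≠ 0 := fun h => h0 (h ▸ List.mem_cons_self ..)
      have h2x0 : x * 2 ≠ 0 := by omega
      set m := t.count x with hm
      set t' := t.filter (fun y => decide (y ≠ x)) with ht'
      have hL : x :: t = List.replicate (m+1) x ++ t' := by
        rw [List.replicate_succ, List.cons_append]
        exact congrArg (x :: ·) hct
      have hxnott' : x ∉ t' := by
        intro h
        simpa using (List.mem_filter.mp h).2
      have hsub_t : t'.Sublist t := List.filter_sublist
      have hsub : t'.Sublist (x :: t) := hsub_t.trans (List.sublist_cons_self ..)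
      have hfxle : f x ≤ ((m+1 : Nat) : Int) := by
        have h := hbd x (List.mem_cons_self ..)
        rw [List.count_cons_self] at h
        exact_mod_cast h
      have hcnt_eq : ∀ y : Int, y ≠ x → t.count y = t'.count y := by
        intro y hy
        conv_lhs => rw [hct]
        rw [List.count_append, List.count_replicate]
        simp [Ne.symm hy]
      rw [hL, loopF_block x t' hx0 (m+1) f (hpos x hx0) hfxle (hpos (x*2) h2x0),
          ofList_rep m x t' hxnott']
      simp only [loopG]
      rw [show (2:Int) * x = x * 2 from mul_comm 2 x]
      by_cases hg : f x > f (x * 2)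
      · rw [if_pos hg, if_pos hg]
      · rw [if_neg hg, if_neg hg]
        have hstep : loopF t' (Function.update (Function.update f (x*2) (f (x*2) - f x)) x 0)
            = loopF t' (Function.update f (x*2) (f (x*2) - f x)) := by
          apply loopF_congr
          rintro w ⟨y, hy, hw⟩
          have hyt : y ∈ t := hsub_t.subset hy
          have hyx : |x| ≤ |y| := (List.pairwise_cons.mp hp).1 y hyt
          have hynx : y ≠ x := fun h => hxnott' (h ▸ hy)
          have hwx : w ≠ x := by
            rcases hw with rfl | rfl
            · exact hynx
            · intro h
              have h1 : |x| = 2 * |y| := by rw [← h, abs_mul]; norm_num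
              have h2 : |y| = 0 := by have := abs_nonneg y; omega
              have h3 : y = 0 := abs_eq_zero.mp h2
              exact hx0 (by omega)
          simp [Function.update_apply, hwx]
        rw [hstep]
        apply ih t' _ ?_ ?_ ?_ ?_ ?_ ?_
        · have h1 : t'.length ≤ t.length := List.length_filter_le _ _
          have h2 : t.length + 1 ≤ N + 1 := by simpa using hlen
          omega
        · exact List.Pairwise.sublist hsub hp
        · exact fun a ha b hb h => hties a (hsub.subset ha) b (hsub.subset hb) h
        · exact fun h => h0 (hsub.subset h)
        · intro w hw
          by_cases hw2 : w = x * 2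
          · subst hw2
            simp only [Function.update_apply]
            have h5 := hpos (x * 2) h2x0
            omega
          · simp only [Function.update_apply, if_neg hw2]
            exact hpos w hw
        · intro y hyt'
          have hynx : y ≠ x := by
            have := (List.mem_filter.mp hyt').2
            simpa using this
          have hyL : y ∈ x :: t := hsub.subset hyt'
          have hbL := hbd y hyL
          have hcL : (x :: t).count y = t'.count y := by
            rw [List.count_cons_of_ne (Ne.symm hynx), hcnt_eq _ hynx]
          by_cases hy2 : y = x * 2
          · subst hy2
            simp only [Function.update_apply]
            have := hpos x hx0
            omega
          · simp only [Function.update_apply, if_neg hy2]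
            omega


-- ---- small arithmetic facts about Python's // and % with divisor 2 ----
theorem fd2 (y : Int) : PySem.Int.floordiv (2 * y) 2 = y := by
  rw [PySem.Int.floordiv_eq_ediv_of_pos (by norm_num)]
  omega

theorem md2 (y : Int) : PySem.Int.mod (2 * y) 2 = 0 := by
  rw [PySem.Int.mod_eq_emod_of_pos (by norm_num)]
  omega

theorem md2_odd (x : Int) (h : x % 2 ≠ 0) : PySem.Int.mod x 2 ≠ 0 := by
  rw [PySem.Int.mod_eq_emod_of_pos (by norm_num)]
  exact h

-- ---- oddPart facts ----
theorem oddPart_eq (x : Int) :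
    oddPart x = if x = 0 then 0 else if x % 2 = 0 then oddPart (x / 2) else x := by
  rw [oddPart.eq_def]
  split_ifs <;> rfl

theorem oddPart_zero : oddPart 0 = 0 := by
  rw [oddPart_eq]; simp

theorem oddPart_two_mul (x : Int) : oddPart (2 * x) = oddPart x := by
  by_cases hx : x = 0
  · subst hx; norm_num
  · rw [show oddPart (2 * x) = oddPart ((2 * x) / 2) by
        rw [oddPart_eq]
        rw [if_neg (by omega), if_pos (by omega)]]
    congr 1
    omega

theorem oddPart_spec : ∀ (n : Nat) (x : Int), x ≠ 0 → x.natAbs ≤ n →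
    (oddPart x % 2 ≠ 0 ∧ ∃ k : Nat, x = oddPart x * 2 ^ k) := by
  intro n
  induction n with
  | zero => intro x hx hle; omega
  | succ n ih =>
    intro x hx hle
    by_cases h2 : x % 2 = 0
    · have hrec : oddPart x = oddPart (x / 2) := by
        rw [oddPart_eq, if_neg hx, if_pos h2]
      have hx2 : x / 2 ≠ 0 := by omega
      have hle2 : (x / 2).natAbs ≤ n := by omega
      obtain ⟨hodd, k, hk⟩ := ih (x / 2) hx2 hle2
      refine ⟨by rw [hrec]; exact hodd, k + 1, ?_⟩
      rw [hrec]
      calc x = 2 * (x / 2) := by omega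
        _ = 2 * (oddPart (x / 2) * 2 ^ k) := by rw [← hk]
        _ = oddPart (x / 2) * 2 ^ (k + 1) := by ring
    · have : oddPart x = x := by
        rw [oddPart_eq, if_neg hx, if_neg h2]
      refine ⟨by rw [this]; exact h2, 0, by rw [this]; ring⟩

theorem oddPart_odd {x : Int} (hx : x ≠ 0) : oddPart x % 2 ≠ 0 :=
  (oddPart_spec x.natAbs x hx le_rfl).1

theorem oddPart_rep {x : Int} (hx : x ≠ 0) : ∃ k : Nat, x = oddPart x * 2 ^ k :=
  (oddPart_spec x.natAbs x hx le_rfl).2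

theorem oddPart_ne_zero {x : Int} (hx : x ≠ 0) : oddPart x ≠ 0 := by
  have := oddPart_odd hx
  omega

theorem ne_zero_of_oddPart_ne_zero {x : Int} (hx : oddPart x ≠ 0) : x ≠ 0 := by
  intro h; rw [h, oddPart_zero] at hx; exact hx rfl

-- ---- chain (o * 2 ^ k) arithmetic ----
theorem abs_o2 (o : Int) (k : Nat) : |o * 2 ^ k| = |o| * 2 ^ k := by
  rw [abs_mul, abs_pow]
  norm_num

theorem chain_abs_lt {o : Int} (ho : o ≠ 0) {a b : Nat} :
    |o * 2 ^ a| < |o * 2 ^ b| ↔ a < b := by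
  rw [abs_o2, abs_o2]
  have hop : 0 < |o| := abs_pos.mpr ho
  constructor
  · intro h
    by_contra hab
    have hba : b ≤ a := by omega
    have h2 : (2:Int) ^ b ≤ 2 ^ a := pow_le_pow_right₀ (by norm_num) hba
    nlinarith
  · intro h
    have h2 : (2:Int) ^ a < 2 ^ b := (pow_lt_pow_iff_right₀ (by norm_num)).mpr h
    nlinarith

theorem chain_abs_le {o : Int} (ho : o ≠ 0) {a b : Nat} :
    |o * 2 ^ a| ≤ |o * 2 ^ b| ↔ a ≤ b := by
  constructor
  · intro h
    by_contra hab
    have h2 : b < a := by omega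
    have h3 := (chain_abs_lt ho).mpr h2
    omega
  · intro h
    by_cases h2 : a = b
    · subst h2; exact le_refl _
    · exact le_of_lt ((chain_abs_lt ho).mpr (by omega))

theorem chain_exp_inj {o : Int} (ho : o ≠ 0) {a b : Nat}
    (h : o * 2 ^ a = o * 2 ^ b) : a = b := by
  have h1 : |o * 2 ^ a| ≤ |o * 2 ^ b| := by rw [h]
  have h2 : |o * 2 ^ b| ≤ |o * 2 ^ a| := by rw [h]
  have := (chain_abs_le ho).mp h1
  have := (chain_abs_le ho).mp h2
  omega

theorem chain_eq_of_abs_eq {o x y : Int} (ho : o ≠ 0)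
    (hx : ∃ k : Nat, x = o * 2 ^ k) (hy : ∃ k : Nat, y = o * 2 ^ k)
    (h : |x| = |y|) : x = y := by
  obtain ⟨a, rfl⟩ := hx
  obtain ⟨b, rfl⟩ := hy
  have hab : a = b := by
    have h1 := (chain_abs_le ho).mp h.le
    have h2 := (chain_abs_le ho).mp h.ge
    omega
  rw [hab]

-- o odd and o * 2 ^ a even forces a ≥ 1, and then the half is o * 2 ^ (a - 1)
theorem chain_half {o : Int} (ho : o % 2 ≠ 0) {a : Nat} {z : Int}
    (h : o * 2 ^ a = 2 * z) : ∃ c : Nat, a = c + 1 ∧ z = o * 2 ^ c := by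
  cases a with
  | zero => simp at h; omega
  | succ c =>
    refine ⟨c, rfl, ?_⟩
    have : 2 * (o * 2 ^ c) = 2 * z := by rw [← h]; ring
    omega

-- ---- the carry check: basic lemmas ----
theorem ok_neg : ∀ (l : List Int) (x y : Int), 0 ≤ x → (∀ c ∈ l, 0 ≤ c) → y < 0 →
    ok x y l = false := by
  intro l
  induction l with
  | nil =>
    intro x y hx _ hy
    simp only [ok, beq_eq_false_iff_ne, ne_eq]
    omega
  | cons c t ih =>
    intro x y hx hc hy
    simp only [ok]
    split_ifs with h
    · rfl
    · exact ih (c - x) y (by have := hc c (List.mem_cons_self ..); omega)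
        (fun d hd => hc d (List.mem_cons_of_mem _ hd)) hy

theorem ok_snoc : ∀ (l : List Int) (a b c : Int), 0 ≤ b →
    ok a b (l ++ [c]) = ok a (c - b) l := by
  intro l
  induction l with
  | nil =>
    intro a b c hb
    simp only [List.nil_append, ok]
    split_ifs with h
    · have : ¬ (a = c - b) := by omega
      simp [this]
    · have : (c - a == b) = (a == c - b) := by
        by_cases he : a = c - b
        · have h1 : c - a = b := by omega
          simp [he, h1]
        · have h1 : ¬ (c - a = b) := by omega
          simp [he, h1]
      rw [this]
  | cons d t ih =>
    intro a b c hb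
    simp only [List.cons_append, ok]
    split_ifs with h
    · rfl
    · exact ih (d - a) b c hb

theorem ok_reverse : ∀ (l : List Int) (a b : Int), 0 ≤ a → 0 ≤ b →
    (∀ c ∈ l, 0 ≤ c) → ok a b l = ok b a l.reverse := by
  intro l
  induction l with
  | nil =>
    intro a b _ _ _
    simp only [List.reverse_nil, ok]
    by_cases h : a = b
    · simp [h]
    · simp [h, Ne.symm h]
  | cons c t ih =>
    intro a b ha hb hc
    have hc0 : 0 ≤ c := hc c (List.mem_cons_self ..)
    have hct : ∀ d ∈ t, 0 ≤ d := fun d hd => hc d (List.mem_cons_of_mem _ hd)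
    simp only [List.reverse_cons, ok]
    rw [ok_snoc t.reverse b a c ha]
    split_ifs with h
    · symm
      apply ok_neg t.reverse b (c - a) hb
      · intro d hd
        exact hct d (List.mem_reverse.mp hd)
      · omega
    · exact ih (c - a) b (by omega) hb hct


-- ---- port-B loop: congruences and the bridge from the Dict state ----
theorem loopH_congr_aux {L : List Int} {f g : Int → Int}
    (h : ∀ w, f w = g w) : loopH L f = loopH L g := by
  have : f = g := funext h
  rw [this]

theorem processAltGo_eq_loopH (L : List Int) (m : PySem.Dict Int Int) :
    processAltGo L m = loopH L (fun v => m.getD v 0) := by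
  induction L generalizing m with
  | nil => rfl
  | cons x rest ih =>
    show (if m.getD x 0 = 0 then _ else _) = _
    simp only [loopH]
    split_ifs with h1 h2 h3
    · exact ih m
    · rfl
    · rfl
    · rw [ih]
      apply loopH_congr_aux
      intro v
      simp only [Function.update_apply, PySem.Dict.getD_modify]

theorem loopH_congr {L : List Int} {f g : Int → Int}
    (h : ∀ w, touchedH L w → f w = g w) : loopH L f = loopH L g := by
  induction L generalizing f g with
  | nil => rfl
  | cons x t ih =>
    have hx : f x = g x := h x ⟨x, List.mem_cons_self .., Or.inl rfl⟩
    have ht : ∀ w, touchedH t w → f w = g w := by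
      rintro w ⟨y, hy, hw⟩; exact h w ⟨y, List.mem_cons_of_mem _ hy, hw⟩
    by_cases hev : x % 2 = 0
    · obtain ⟨z, hz⟩ : ∃ z, x = 2 * z := ⟨x / 2, by omega⟩
      have hzv : f z = g z := h z ⟨x, List.mem_cons_self .., Or.inr ⟨z, hz, rfl⟩⟩
      have hmod : PySem.Int.mod x 2 = 0 := by rw [hz]; exact md2 z
      have hfd : PySem.Int.floordiv x 2 = z := by rw [hz]; exact fd2 z
      simp only [loopH, hfd, hmod, hx, hzv]
      split_ifs with h1 h2 h3
      · exact ih ht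
      · rfl
      · rfl
      · apply ih
        rintro w hw
        by_cases hwz : w = z
        · subst hwz; simp [Function.update_apply]
        · simp only [Function.update_apply, if_neg hwz]
          exact ht w hw
    · have hmod : PySem.Int.mod x 2 ≠ 0 := md2_odd x hev
      simp only [loopH, hx]
      split_ifs with h1
      · exact ih ht
      · rfl

-- splitting a run of loopF along classes closed under doubling
theorem loopF_splitP (p : Int → Bool) (hp : ∀ v, p (2 * v) = p v) :
    ∀ (L : List Int) (f : Int → Int),
    loopF L f = (loopF (L.filter p) f && loopF (L.filter (fun v => !p v)) f) := by
  intro L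
  induction L with
  | nil => intro f; rfl
  | cons n t ih =>
    intro f
    by_cases hn : p n = true
    · have e1 : (n :: t).filter p = n :: t.filter p := by simp [hn]
      have e2 : (n :: t).filter (fun v => !p v) = t.filter (fun v => !p v) := by simp [hn]
      rw [e1, e2]
      simp only [loopF]
      split_ifs with h1 h2
      · exact ih f
      · simp
      · rw [ih (stepA f n)]
        congr 1
        apply loopF_congr
        rintro w ⟨y, hy, hw⟩
        have hyp : p y = false := by
          have := (List.mem_filter.mp hy).2; simpa using this
        have hwp : p w = false := by
          rcases hw with rfl | rfl
          · exact hyp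
          · rw [hp]; exact hyp
        apply stepA_apply_ne
        · intro hwn; rw [hwn, hn] at hwp; cases hwp
        · intro hwn; rw [hwn, mul_comm, hp, hn] at hwp; cases hwp
    · have hn' : p n = false := by simpa using hn
      have e1 : (n :: t).filter p = t.filter p := by simp [hn']
      have e2 : (n :: t).filter (fun v => !p v) = n :: t.filter (fun v => !p v) := by simp [hn']
      rw [e1, e2]
      simp only [loopF]
      split_ifs with h1 h2
      · exact ih f
      · simp
      · rw [ih (stepA f n)]
        congr 1
        apply loopF_congr
        rintro w ⟨y, hy, hw⟩
        have hyp : p y = true := (List.mem_filter.mp hy).2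
        have hwp : p w = true := by
          rcases hw with rfl | rfl
          · exact hyp
          · rw [hp]; exact hyp
        apply stepA_apply_ne
        · intro hwn; rw [hwn, hn'] at hwp; cases hwp
        · intro hwn; rw [hwn, mul_comm, hp, hn'] at hwp; cases hwp

-- splitting a run of loopH along classes closed under doubling
theorem loopH_splitP (p : Int → Bool) (hp : ∀ v, p (2 * v) = p v) :
    ∀ (L : List Int) (f : Int → Int),
    loopH L f = (loopH (L.filter p) f && loopH (L.filter (fun v => !p v)) f) := by
  intro L
  induction L with
  | nil => intro f; rfl
  | cons n t ih =>
    intro f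
    have key : ∀ (g : Int → Int), ¬ PySem.Int.mod n 2 ≠ 0 →
        ¬ g (PySem.Int.floordiv n 2) < g n →
        ∀ w, touchedH (t.filter (fun v => !(p v == p n))) w →
        Function.update g (PySem.Int.floordiv n 2)
          (g (PySem.Int.floordiv n 2) - g n) w = g w := by
      intro g hm _ w hw
      have hm2 : n % 2 = 0 := by
        rw [PySem.Int.mod_eq_emod_of_pos (by norm_num)] at hm
        omega
      obtain ⟨z, hz⟩ : ∃ z, n = 2 * z := ⟨n / 2, by omega⟩
      have hfd : PySem.Int.floordiv n 2 = z := by rw [hz]; exact fd2 z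
      have hpz : p z = p n := by rw [hz, hp]
      obtain ⟨y, hy, hw⟩ := hw
      have hyp : (p y == p n) = false := by
        have := (List.mem_filter.mp hy).2; simpa using this
      have hwy : p w = p y := by
        rcases hw with rfl | ⟨u, hu, rfl⟩
        · rfl
        · rw [hu, hp]
      rw [hfd, Function.update_apply, if_neg]
      intro hwz
      rw [hwz, hpz] at hwy
      simp [← hwy] at hyp
    by_cases hn : p n = true
    · have e1 : (n :: t).filter p = n :: t.filter p := by simp [hn]
      have e2 : (n :: t).filter (fun v => !p v) = t.filter (fun v => !p v) := by simp [hn]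
      rw [e1, e2]
      simp only [loopH]
      split_ifs with h1 h2 h3
      · exact ih f
      · simp
      · simp
      · rw [ih (Function.update f (PySem.Int.floordiv n 2)
              (f (PySem.Int.floordiv n 2) - f n))]
        congr 1
        apply loopH_congr
        intro w hw
        apply key f h2 h3 w
        · obtain ⟨y, hy, hwy⟩ := hw
          refine ⟨y, ?_, hwy⟩
          rw [List.mem_filter] at hy ⊢
          refine ⟨hy.1, ?_⟩
          have := hy.2
          simp at this
          simp [this, hn]
    · have hn' : p n = false := by simpa using hn
      have e1 : (n :: t).filter p = t.filter p := by simp [hn']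
      have e2 : (n :: t).filter (fun v => !p v) = n :: t.filter (fun v => !p v) := by simp [hn']
      rw [e1, e2]
      simp only [loopH]
      split_ifs with h1 h2 h3
      · exact ih f
      · simp
      · simp
      · rw [ih (Function.update f (PySem.Int.floordiv n 2)
              (f (PySem.Int.floordiv n 2) - f n))]
        congr 1
        apply loopH_congr
        intro w hw
        apply key f h2 h3 w
        · obtain ⟨y, hy, hwy⟩ := hw
          refine ⟨y, ?_, hwy⟩
          rw [List.mem_filter] at hy ⊢
          refine ⟨hy.1, ?_⟩
          have := hy.2
          simp [hn']
          exact this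

theorem all_congr {l : List Int} {f g : Int → Bool} (h : ∀ x ∈ l, f x = g x) :
    l.all f = l.all g := by
  induction l with
  | nil => rfl
  | cons a t ih =>
    simp only [List.all_cons]
    rw [h a (List.mem_cons_self ..), ih (fun x hx => h x (List.mem_cons_of_mem _ hx))]

-- decompose a class-closed loop into independent runs over the chains (odd parts)
theorem loop_chains (loop : List Int → (Int → Int) → Bool)
    (hnil : ∀ f, loop [] f = true)
    (hsplit : ∀ (p : Int → Bool), (∀ v, p (2 * v) = p v) → ∀ L f,
      loop L f = (loop (L.filter p) f && loop (L.filter (fun v => !p v)) f)) :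
    ∀ (os : List Int), os.Nodup → ∀ (L : List Int) (f : Int → Int),
    (∀ x ∈ L, oddPart x ∈ os) →
    loop L f = os.all (fun o => loop (L.filter (fun x => oddPart x == o)) f) := by
  intro os
  induction os with
  | nil =>
    intro _ L f hcov
    have : L = [] := by
      cases L with
      | nil => rfl
      | cons a t => exact absurd (hcov a (List.mem_cons_self ..)) (List.not_mem_nil)
    subst this
    rw [hnil]
    rfl
  | cons o os' ih =>
    intro hnd L f hcov
    have hclosed : ∀ v, (fun x => oddPart x == o) (2 * v) = (fun x => oddPart x == o) v := by
      intro v; simp only [oddPart_two_mul]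
    rw [hsplit (fun x => oddPart x == o) hclosed L f, List.all_cons]
    congr 1
    rw [ih (List.Nodup.of_cons hnd) (L.filter fun v => !(oddPart v == o)) f ?cov]
    case cov =>
      intro x hx
      rw [List.mem_filter] at hx
      have h1 := hcov x hx.1
      have h2 := hx.2
      simp only [Bool.not_eq_eq_eq_not, Bool.not_true, beq_eq_false_iff_ne, ne_eq] at h2
      rcases List.mem_cons.mp h1 with h | h
      · exact absurd h h2
      · exact h
    apply all_congr
    intro o' ho'
    have hoo : o' ≠ o := fun h => (List.nodup_cons.mp hnd).1 (h ▸ ho')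
    congr 1
    rw [List.filter_filter]
    apply List.filter_congr
    intro x _
    by_cases hx : oddPart x = o'
    · simp [hx, hoo]
    · simp [hx]

-- ---- padded count lists: congruence, nonnegativity, reversal ----
theorem pc_congr : ∀ (t : List Int) (x : Int) {f g : Int → Int},
    (∀ y ∈ t, f y = g y) → pc f x t = pc g x t := by
  intro t
  induction t with
  | nil => intro x f g _; rfl
  | cons y t' ih =>
    intro x f g h
    simp only [pc]
    rw [h y (List.mem_cons_self ..), ih y (fun z hz => h z (List.mem_cons_of_mem _ hz))]

theorem pcD_congr : ∀ (t : List Int) (x : Int) {f g : Int → Int},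
    (∀ y ∈ t, f y = g y) → pcD f x t = pcD g x t := by
  intro t
  induction t with
  | nil => intro x f g _; rfl
  | cons y t' ih =>
    intro x f g h
    simp only [pcD]
    rw [h y (List.mem_cons_self ..), ih y (fun z hz => h z (List.mem_cons_of_mem _ hz))]

theorem pc_nonneg : ∀ (t : List Int) (x : Int) (f : Int → Int),
    (∀ y ∈ t, 0 ≤ f y) → ∀ c ∈ pc f x t, 0 ≤ c := by
  intro t
  induction t with
  | nil => intro x f _ c hc; cases hc
  | cons y t' ih =>
    intro x f h c hc
    simp only [pc, List.mem_append, List.mem_cons] at hc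
    rcases hc with hc | hc | hc
    · split_ifs at hc
      · cases hc
      · simp at hc; omega
    · rw [hc]; exact h y (List.mem_cons_self ..)
    · exact ih y f (fun z hz => h z (List.mem_cons_of_mem _ hz)) c hc

theorem pcD_snoc : ∀ (l : List Int) (w x : Int) (f : Int → Int),
    pcD f w (l ++ [x]) =
      pcD f w l ++ ((if l.getLastD w = 2 * x then ([] : List Int) else [0]) ++ [f x]) := by
  intro l
  induction l with
  | nil =>
    intro w x f
    simp [pcD]
  | cons y l' ih =>
    intro w x f
    simp only [List.cons_append, pcD, ih y x f, List.getLastD_cons]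
    simp [List.append_assoc]

theorem fullD_snoc (l : List Int) (x : Int) (f : Int → Int) (hl : l ≠ []) :
    fullD f (l ++ [x]) =
      fullD f l ++ ((if l.getLastD 0 = 2 * x then ([] : List Int) else [0]) ++ [f x]) := by
  cases l with
  | nil => exact absurd rfl hl
  | cons w l'' =>
    simp only [List.cons_append, fullD, pcD_snoc, List.getLastD_cons]

theorem getLastD_concat' : ∀ (l : List Int) (a d : Int), (l ++ [a]).getLastD d = a := by
  intro l
  induction l with
  | nil => intro a d; rfl
  | cons b t ih =>
    intro a d
    simp only [List.cons_append, List.getLastD_cons]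
    exact ih a b

theorem full_rev : ∀ (t : List Int) (x : Int) (f : Int → Int),
    fullD f ((x :: t).reverse) = (fullC f (x :: t)).reverse := by
  intro t
  induction t with
  | nil => intro x f; rfl
  | cons y t' ih =>
    intro x f
    have h1 : (x :: y :: t').reverse = (y :: t').reverse ++ [x] := by
      simp
    have h2 : (y :: t').reverse = t'.reverse ++ [y] := by simp
    have hne : (y :: t').reverse ≠ [] := by simp
    have hlast : ((y :: t').reverse).getLastD 0 = y := by
      rw [h2, getLastD_concat']
    rw [h1, fullD_snoc _ _ _ hne, hlast, ih y f]
    show _ = (fullC f (x :: y :: t')).reverse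
    simp only [fullC, pc]
    by_cases hp : y = 2 * x
    · simp [hp]
    · simp [hp]


-- ---- per-chain equivalence: each greedy pass computes the carry check on the chain ----
theorem chain_ne_zero {o u : Int} (ho : o ≠ 0) (h : ∃ k : Nat, u = o * 2 ^ k) : u ≠ 0 := by
  obtain ⟨k, rfl⟩ := h
  exact mul_ne_zero ho (pow_ne_zero _ (by norm_num))

theorem abs_two_mul_gt {u : Int} (hu : u ≠ 0) : |u| < |2 * u| := by
  rw [abs_mul, abs_two]
  have := abs_pos.mpr hu
  omega

theorem h3_tail {o x : Int} {l : List Int} {f : Int → Int} (ho : o ≠ 0)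
    (hpow : ∀ u ∈ x :: l, ∃ k : Nat, u = o * 2 ^ k)
    (hpair : (x :: l).Pairwise fun a b => |a| < |b|)
    (h3 : ∀ u ∈ x :: l, 2 * u ∈ x :: l ∨ f (2 * u) = 0) :
    ∀ u ∈ l, 2 * u ∈ l ∨ f (2 * u) = 0 := by
  intro u hu
  rcases h3 u (List.mem_cons_of_mem _ hu) with h | h
  · rcases List.mem_cons.mp h with h' | h'
    · exfalso
      have hu0 : u ≠ 0 := chain_ne_zero ho (hpow u (List.mem_cons_of_mem _ hu))
      have h1 : |x| < |u| := (List.pairwise_cons.mp hpair).1 u hu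
      have h2 : |u| < |2 * u| := abs_two_mul_gt hu0
      rw [h'] at h2
      omega
    · exact Or.inl h'
  · exact Or.inr h

theorem loopG_chain (o : Int) (ho : o ≠ 0) :
    ∀ (t : List Int) (x : Int) (f : Int → Int),
    (∀ u ∈ x :: t, ∃ k : Nat, u = o * 2 ^ k) →
    (x :: t).Pairwise (fun a b => |a| < |b|) →
    (∀ u ∈ x :: t, 2 * u ∈ x :: t ∨ f (2 * u) = 0) →
    (∀ u ∈ x :: t, 0 ≤ f u) →
    loopG (x :: t) f = ok (f x) 0 (pc f x t) := by
  intro t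
  induction t with
  | nil =>
    intro x f hpow _ h3 hnn
    have hx0 : x ≠ 0 := chain_ne_zero ho (hpow x (List.mem_cons_self ..))
    have h2x : f (2 * x) = 0 := by
      rcases h3 x (List.mem_cons_self ..) with h | h
      · exfalso
        have : 2 * x = x := by simpa using h
        omega
      · exact h
    have hfx : 0 ≤ f x := hnn x (List.mem_cons_self ..)
    show (if f x > f (2 * x) then false else loopG [] _) = ok (f x) 0 []
    rw [h2x]
    by_cases hc : f x > 0
    · rw [if_pos hc]
      show false = (f x == 0)
      symm
      simp only [beq_eq_false_iff_ne, ne_eq]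
      omega
    · rw [if_neg hc]
      show true = (f x == 0)
      symm
      simp only [beq_iff_eq]
      omega
  | cons y t' ih =>
    intro x f hpow hpair h3 hnn
    have hx0 : x ≠ 0 := chain_ne_zero ho (hpow x (List.mem_cons_self ..))
    obtain ⟨a, hxa⟩ := hpow x (List.mem_cons_self ..)
    obtain ⟨b, hyb⟩ := hpow y (List.mem_cons_of_mem _ (List.mem_cons_self ..))
    rcases List.pairwise_cons.mp hpair with ⟨hxall, hpair'⟩
    have hxy : |x| < |y| := hxall y (List.mem_cons_self ..)
    have hab : a < b := by
      rw [hxa, hyb] at hxy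
      exact (chain_abs_lt ho).mp hxy
    have hpow' : ∀ u ∈ y :: t', ∃ k : Nat, u = o * 2 ^ k :=
      fun u hu => hpow u (List.mem_cons_of_mem _ hu)
    have hyne : ∀ z ∈ t', z ≠ y := by
      intro z hz h
      have := (List.pairwise_cons.mp hpair').1 z hz
      rw [h] at this
      omega
    have h3' := h3_tail ho hpow hpair h3
    by_cases hkey : y = 2 * x
    · have hpcg : pc f x (y :: t') = f y :: pc f y t' := by simp [pc, hkey]
      rw [hpcg]
      show (if f x > f (2 * x) then false
            else loopG (y :: t') (Function.update f (2 * x) (f (2 * x) - f x)))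
          = ok (f x) 0 (f y :: pc f y t')
      rw [← hkey]
      show _ = (if f x > f y then false else ok (f y - f x) 0 (pc f y t'))
      split_ifs with h
      · rfl
      · set f' := Function.update f y (f y - f x) with hf'
        have hf'y : f' y = f y - f x := by simp [hf']
        have hf'z : ∀ z ∈ t', f' z = f z := by
          intro z hz
          simp [hf', Function.update_apply, hyne z hz]
        rw [ih y f' hpow' hpair' ?h3n ?nnn]
        case h3n =>
          intro u hu
          rcases h3' u hu with h2 | h2
          · left; exact h2
          · right
            have h2uy : 2 * u ≠ y := by
              intro he
              have hux : u = x := by omega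
              have := hxall u hu
              rw [hux] at this
              omega
            rw [hf', Function.update_apply, if_neg h2uy]
            exact h2
        case nnn =>
          intro u hu
          rcases List.mem_cons.mp hu with h2 | h2
          · rw [h2, hf'y]; omega
          · rw [hf'z u h2]
            exact hnn u (List.mem_cons_of_mem _ (List.mem_cons_of_mem _ h2))
        rw [hf'y, pc_congr t' y hf'z]
    · -- gap between x and y: the double of x carries count 0
      have h2xa : 2 * x = o * 2 ^ (a + 1) := by rw [hxa]; ring
      have h2x0 : f (2 * x) = 0 := by
        rcases h3 x (List.mem_cons_self ..) with h | h
        · exfalso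
          rcases List.mem_cons.mp h with h' | h'
          · omega
          · rcases List.mem_cons.mp h' with h'' | h''
            · exact hkey h''.symm
            · have hlt : |y| < |2 * x| := (List.pairwise_cons.mp hpair').1 _ h''
              obtain ⟨c, hc⟩ := hpow (2 * x) (List.mem_cons_of_mem _ h')
              have hca : c = a + 1 := chain_exp_inj ho (hc.symm.trans h2xa)
              have hbne : b ≠ a + 1 := by
                intro hba
                exact hkey (by rw [hyb, hba, ← h2xa])
              have : |2 * x| < |y| := by
                rw [h2xa, hyb]
                exact (chain_abs_lt ho).mpr (by omega)
              omega
        · exact h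
      have hpcg : pc f x (y :: t') = 0 :: f y :: pc f y t' := by simp [pc, hkey]
      rw [hpcg]
      show (if f x > f (2 * x) then false
            else loopG (y :: t') (Function.update f (2 * x) (f (2 * x) - f x)))
          = (if f x > 0 then false else ok (0 - f x) 0 (f y :: pc f y t'))
      rw [h2x0]
      have hfx : 0 ≤ f x := hnn x (List.mem_cons_self ..)
      split_ifs with hc
      · rfl
      · have hfx0 : f x = 0 := by omega
        have hupd : Function.update f (2 * x) (0 - f x) = f := by
          funext w
          by_cases hw : w = 2 * x
          · rw [hw]; simp [Function.update_apply, h2x0, hfx0]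
          · simp [Function.update_apply, hw]
        rw [hupd]
        have hfy : 0 ≤ f y := hnn y (List.mem_cons_of_mem _ (List.mem_cons_self ..))
        show _ = ok (0 - f x) 0 (f y :: pc f y t')
        rw [show (0 : Int) - f x = 0 by omega]
        show _ = (if (0:Int) > f y then false else ok (f y - 0) 0 (pc f y t'))
        rw [if_neg (by omega), show f y - 0 = f y by ring]
        exact ih y f hpow' hpair' (by
          intro u hu
          rcases h3' u hu with h2 | h2
          · exact Or.inl h2
          · exact Or.inr h2)
          (fun u hu => hnn u (List.mem_cons_of_mem _ hu))

theorem h3H_tail {x : Int} {l : List Int} {f : Int → Int}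
    (hpair : (x :: l).Pairwise fun a b => |b| < |a|)
    (h3 : ∀ u ∈ x :: l, ∀ z, u = 2 * z → (z ∈ x :: l ∨ f z = 0)) :
    ∀ u ∈ l, ∀ z, u = 2 * z → (z ∈ l ∨ f z = 0) := by
  intro u hu z hz
  rcases h3 u (List.mem_cons_of_mem _ hu) z hz with h | h
  · rcases List.mem_cons.mp h with h' | h'
    · exfalso
      have h1 : |u| < |x| := (List.pairwise_cons.mp hpair).1 u hu
      have hz0 : z ≠ 0 := by
        intro h0
        rw [h0] at hz
        simp at hz
        rw [hz] at h1
        rw [h'] at h0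
        simp [h0] at h1
      have h2 : |z| < |2 * z| := abs_two_mul_gt hz0
      rw [← hz, h'] at h2
      omega
    · exact Or.inl h'
  · exact Or.inr h

theorem loopH_chain (o : Int) (ho : o % 2 ≠ 0) :
    ∀ (t : List Int) (x : Int) (f : Int → Int),
    (∀ u ∈ x :: t, ∃ k : Nat, u = o * 2 ^ k) →
    (x :: t).Pairwise (fun a b => |b| < |a|) →
    (∀ u ∈ x :: t, ∀ z, u = 2 * z → (z ∈ x :: t ∨ f z = 0)) →
    (∀ u ∈ x :: t, 0 ≤ f u) →
    loopH (x :: t) f = ok (f x) 0 (pcD f x t) := by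
  have ho0 : o ≠ 0 := by omega
  intro t
  induction t with
  | nil =>
    intro x f hpow _ h3 hnn
    have hx0 : x ≠ 0 := chain_ne_zero ho0 (hpow x (List.mem_cons_self ..))
    have hfx : 0 ≤ f x := hnn x (List.mem_cons_self ..)
    by_cases h1 : f x = 0
    · show (if f x = 0 then loopH [] f else _) = ok (f x) 0 []
      rw [if_pos h1]
      show true = (f x == 0)
      simp [h1]
    · have hne : false = (f x == 0) := by
        symm
        simp only [beq_eq_false_iff_ne, ne_eq]
        exact h1
      by_cases hev : x % 2 = 0
      · obtain ⟨z, hz⟩ : ∃ z, x = 2 * z := ⟨x / 2, by omega⟩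
        have hmod : PySem.Int.mod x 2 = 0 := by rw [hz]; exact md2 z
        have hfd : PySem.Int.floordiv x 2 = z := by rw [hz]; exact fd2 z
        have hfz : f z = 0 := by
          rcases h3 x (List.mem_cons_self ..) z hz with h | h
          · exfalso
            have : z = x := by simpa using h
            omega
          · exact h
        show (if f x = 0 then loopH [] f
              else if PySem.Int.mod x 2 ≠ 0 then false
              else if f (PySem.Int.floordiv x 2) < f x then false else _) = ok (f x) 0 []
        rw [if_neg h1, hmod, if_neg (by simp), hfd, hfz, if_pos (by omega)]
        exact hne
      · have hmod : PySem.Int.mod x 2 ≠ 0 := md2_odd x hev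
        show (if f x = 0 then loopH [] f
              else if PySem.Int.mod x 2 ≠ 0 then false else _) = ok (f x) 0 []
        rw [if_neg h1, if_pos hmod]
        exact hne
  | cons y t' ih =>
    intro x f hpow hpair h3 hnn
    have hx0 : x ≠ 0 := chain_ne_zero ho0 (hpow x (List.mem_cons_self ..))
    obtain ⟨a, hxa⟩ := hpow x (List.mem_cons_self ..)
    obtain ⟨b, hyb⟩ := hpow y (List.mem_cons_of_mem _ (List.mem_cons_self ..))
    rcases List.pairwise_cons.mp hpair with ⟨hxall, hpair'⟩
    have hxy : |y| < |x| := hxall y (List.mem_cons_self ..)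
    have hab : b < a := by
      rw [hxa, hyb] at hxy
      exact (chain_abs_lt ho0).mp hxy
    have hpow' : ∀ u ∈ y :: t', ∃ k : Nat, u = o * 2 ^ k :=
      fun u hu => hpow u (List.mem_cons_of_mem _ hu)
    have hyne : ∀ z ∈ t', z ≠ y := by
      intro z hz h
      have := (List.pairwise_cons.mp hpair').1 z hz
      rw [h] at this
      omega
    have h3' := h3H_tail hpair h3
    have hfx : 0 ≤ f x := hnn x (List.mem_cons_self ..)
    have hfy : 0 ≤ f y := hnn y (List.mem_cons_of_mem _ (List.mem_cons_self ..))
    by_cases hkey : x = 2 * y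
    · have hmod : PySem.Int.mod x 2 = 0 := by rw [hkey]; exact md2 y
      have hfd : PySem.Int.floordiv x 2 = y := by rw [hkey]; exact fd2 y
      have hpcd : pcD f x (y :: t') = f y :: pcD f y t' := by simp [pcD, hkey]
      rw [hpcd]
      show (if f x = 0 then loopH (y :: t') f
            else if PySem.Int.mod x 2 ≠ 0 then false
            else if f (PySem.Int.floordiv x 2) < f x then false
            else loopH (y :: t') (Function.update f (PySem.Int.floordiv x 2)
              (f (PySem.Int.floordiv x 2) - f x)))
          = (if f x > f y then false else ok (f y - f x) 0 (pcD f y t'))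
      by_cases h1 : f x = 0
      · rw [if_pos h1, if_neg (by omega)]
        rw [ih y f hpow' hpair' h3' (fun u hu => hnn u (List.mem_cons_of_mem _ hu))]
        rw [show f y - f x = f y by omega]
      · rw [if_neg h1, hmod, if_neg (by simp), hfd]
        by_cases h2 : f y < f x
        · rw [if_pos h2, if_pos (by omega)]
        · rw [if_neg h2, if_neg (by omega)]
          set f' := Function.update f y (f y - f x) with hf'
          have hf'y : f' y = f y - f x := by simp [hf']
          have hf'z : ∀ z ∈ t', f' z = f z := by
            intro z hz
            simp [hf', Function.update_apply, hyne z hz]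
          rw [ih y f' hpow' hpair' ?h3n ?nnn]
          case h3n =>
            intro u hu z hz
            rcases h3' u hu z hz with h4 | h4
            · exact Or.inl h4
            · right
              have hzy : z ≠ y := by
                intro he
                rw [he] at hz
                rw [← hkey] at hz
                have : u ∈ y :: t' := hu
                rcases List.mem_cons.mp this with h5 | h5
                · rw [h5] at hz; rw [hz] at hxy; omega
                · have := (List.pairwise_cons.mp hpair').1 u h5
                  rw [hz] at this
                  omega
              rw [hf', Function.update_apply, if_neg hzy]
              exact h4
          case nnn =>
            intro u hu
            rcases List.mem_cons.mp hu with h4 | h4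
            · rw [h4, hf'y]; omega
            · rw [hf'z u h4]
              exact hnn u (List.mem_cons_of_mem _ (List.mem_cons_of_mem _ h4))
          rw [hf'y, pcD_congr t' y hf'z]
    · -- gap below x: x's half carries count 0
      have hpcd : pcD f x (y :: t') = 0 :: f y :: pcD f y t' := by simp [pcD, hkey]
      rw [hpcd]
      show _ = (if f x > 0 then false else ok (0 - f x) 0 (f y :: pcD f y t'))
      by_cases h1 : f x = 0
      · show (if f x = 0 then loopH (y :: t') f else _) = _
        rw [if_pos h1, if_neg (by omega)]
        rw [show (0:Int) - f x = 0 by omega]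
        show _ = (if (0:Int) > f y then false else ok (f y - 0) 0 (pcD f y t'))
        rw [if_neg (by omega), show f y - 0 = f y by ring]
        exact ih y f hpow' hpair' h3' (fun u hu => hnn u (List.mem_cons_of_mem _ hu))
      · rw [if_pos (by omega)]
        by_cases hev : x % 2 = 0
        · obtain ⟨z, hz⟩ : ∃ z, x = 2 * z := ⟨x / 2, by omega⟩
          have hmod : PySem.Int.mod x 2 = 0 := by rw [hz]; exact md2 z
          have hfd : PySem.Int.floordiv x 2 = z := by rw [hz]; exact fd2 z
          obtain ⟨c, hac, hzc⟩ := chain_half ho (hxa ▸ hz)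
          have hfz : f z = 0 := by
            rcases h3 x (List.mem_cons_self ..) z hz with h | h
            · exfalso
              rcases List.mem_cons.mp h with h' | h'
              · rw [h'] at hz; omega
              · have hbc : b ≠ c := by
                  intro hbc
                  apply hkey
                  rw [hz, hzc, hyb, hbc]
                have hzy : |z| < |y| ∨ |y| < |z| := by
                  rw [hzc, hyb]
                  rcases Nat.lt_or_ge c b with h6 | h6
                  · exact Or.inl ((chain_abs_lt ho0).mpr h6)
                  · exact Or.inr ((chain_abs_lt ho0).mpr (by omega))
                have hcb : b < c := by omega
                have hzgty : |y| < |z| := by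
                  rw [hzc, hyb]
                  exact (chain_abs_lt ho0).mpr hcb
                rcases List.mem_cons.mp h' with h'' | h''
                · rw [h''] at hzgty; omega
                · have := (List.pairwise_cons.mp hpair').1 z h''
                  omega
            · exact h
          show (if f x = 0 then loopH (y :: t') f
                else if PySem.Int.mod x 2 ≠ 0 then false
                else if f (PySem.Int.floordiv x 2) < f x then false else _) = false
          rw [if_neg h1, hmod, if_neg (by simp), hfd, hfz, if_pos (by omega)]
        · have hmod : PySem.Int.mod x 2 ≠ 0 := md2_odd x hev
          show (if f x = 0 then loopH (y :: t') f
                else if PySem.Int.mod x 2 ≠ 0 then false else _) = false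
          rw [if_neg h1, if_pos hmod]


-- ---- small glue lemmas for the final assembly ----
theorem fullC_nonneg (C : List Int) (f : Int → Int) (h : ∀ u ∈ C, 0 ≤ f u) :
    ∀ c ∈ fullC f C, 0 ≤ c := by
  cases C with
  | nil => intro c hc; cases hc
  | cons x t =>
    intro c hc
    rcases List.mem_cons.mp hc with h1 | h1
    · rw [h1]; exact h x (List.mem_cons_self ..)
    · exact pc_nonneg t x f (fun y hy => h y (List.mem_cons_of_mem _ hy)) c h1

theorem loopH_zero (f : Int → Int) : loopH [0] f = true := by
  have hm : PySem.Int.mod 0 2 = 0 := by simpa using md2 0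
  have hd : PySem.Int.floordiv 0 2 = 0 := by simpa using fd2 0
  show (if f 0 = 0 then loopH [] f
        else if PySem.Int.mod 0 2 ≠ 0 then false
        else if f (PySem.Int.floordiv 0 2) < f 0 then false else _) = true
  rw [hm, hd]
  split_ifs with h1 h2 h3
  · rfl
  · exact absurd rfl h2
  · omega
  · rfl

theorem pairwise_strengthen {l : List Int} {r s : Int → Int → Prop}
    (h : l.Pairwise r) (hs : ∀ a ∈ l, ∀ b ∈ l, r a b → s a b) : l.Pairwise s := by
  induction l with
  | nil => exact List.Pairwise.nil
  | cons a t ih =>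
    rcases List.pairwise_cons.mp h with ⟨h1, h2⟩
    refine List.pairwise_cons.mpr ⟨?_, ?_⟩
    · intro b hb
      exact hs a (List.mem_cons_self ..) b (List.mem_cons_of_mem _ hb) (h1 b hb)
    · exact ih h2 (fun x hx y hy =>
        hs x (List.mem_cons_of_mem _ hx) y (List.mem_cons_of_mem _ hy))

theorem strict_sorted_unique {R : Int → Int → Prop} (hasym : ∀ a b, R a b → ¬ R b a) :
    ∀ {l₁ l₂ : List Int}, l₁.Perm l₂ → l₁.Pairwise R → l₂.Pairwise R → l₁ = l₂ := by
  intro l₁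
  induction l₁ with
  | nil =>
    intro l₂ hp _ _
    exact (hp.symm.eq_nil).symm
  | cons a t ih =>
    intro l₂ hp h1 h2
    cases l₂ with
    | nil => cases hp.eq_nil
    | cons b t₂ =>
      have hab : a = b := by
        rcases List.mem_cons.mp (hp.subset (List.mem_cons_self ..)) with h | h
        · exact h
        · exfalso
          have hRba : R b a := (List.pairwise_cons.mp h2).1 a h
          rcases List.mem_cons.mp (hp.symm.subset (List.mem_cons_self ..)) with h' | h'
          · rw [h'] at hRba; exact hasym a a hRba hRba
          · exact hasym b a hRba ((List.pairwise_cons.mp h1).1 b h')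
      subst hab
      rw [ih hp.cons_inv (List.Pairwise.of_cons h1) (List.Pairwise.of_cons h2)]

theorem process_eq (arr : List Int) : process arr = process_alt arr := by
  unfold process process_alt
  rw [processGo_eq_loopF, processAltGo_eq_loopH]
  have hperm : (PySem.List.sorted arr (fun x => |x|)).Perm arr :=
    PySem.List.sorted_perm ..
  set S := PySem.List.sorted arr (fun x => |x|) with hS
  have hfA : (fun v => (PySem.Dict.counter arr).getD v 0)
      = (fun v : Int => ((S.count v : Nat) : Int)) := by
    funext v
    rw [PySem.Dict.getD_counter, hperm.count_eq v]
  rw [hfA]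
  set f := fun v : Int => ((S.count v : Nat) : Int) with hfdef
  set DK := PySem.List.sorted (PySem.Dict.counter arr).keys (fun x => |x|) true with hDK
  have hkeys : (PySem.Dict.counter arr).keys = PySem.Set.ofList arr :=
    PySem.Dict.keys_counter ..
  have hDKperm : DK.Perm (PySem.Set.ofList arr) := by
    rw [hDK, hkeys]
    exact PySem.List.sorted_perm ..
  have hmemDKS : ∀ x ∈ DK, x ∈ S := by
    intro x hx
    have h1 : x ∈ PySem.Set.ofList arr := hDKperm.subset hx
    have h2 : x ∈ arr := (PySem.Set.mem_ofList ..).mp h1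
    exact hperm.mem_iff.mpr h2
  set os := (S.map oddPart).dedup with hos
  have hosnd : os.Nodup := List.nodup_dedup _
  have hcovS : ∀ x ∈ S, oddPart x ∈ os := fun x hx =>
    List.mem_dedup.mpr (List.mem_map.mpr ⟨x, hx, rfl⟩)
  have hcovDK : ∀ x ∈ DK, oddPart x ∈ os := fun x hx => hcovS x (hmemDKS x hx)
  rw [loop_chains loopF (fun _ => rfl) loopF_splitP os hosnd S f hcovS,
      loop_chains loopH (fun _ => rfl) loopH_splitP os hosnd DK f hcovDK]
  apply all_congr
  intro o hoos
  obtain ⟨s, hsS, hso⟩ : ∃ s ∈ S, oddPart s = o := by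
    rcases List.mem_map.mp (List.mem_dedup.mp hoos) with ⟨s, h1, h2⟩
    exact ⟨s, h1, h2⟩
  have hDKnd : DK.Nodup := (hDKperm.nodup_iff).mpr (PySem.Set.nodup_ofList ..)
  by_cases ho0 : o = 0
  · -- the zero chain: both passes trivially accept it
    subst ho0
    have hfe : S.filter (fun x => oddPart x == 0) = S.filter (fun x => x == 0) := by
      apply List.filter_congr
      intro x _
      by_cases hx : x = 0
      · simp [hx, oddPart_zero]
      · simp [hx, oddPart_ne_zero hx]
    have hFtrue : loopF (S.filter (fun x => oddPart x == 0)) f = true := by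
      rw [hfe, List.filter_beq]
      have h1 := loopF_zeros (S.count 0) [] f (by simp)
      rw [List.append_nil] at h1
      exact h1
    have hall0 : ∀ u ∈ DK.filter (fun x => oddPart x == 0), u = 0 := by
      intro u hu
      have := (List.mem_filter.mp hu).2
      simp only [beq_iff_eq] at this
      by_contra hu0
      exact oddPart_ne_zero hu0 this
    have hD0nd : (DK.filter (fun x => oddPart x == 0)).Nodup := hDKnd.filter _
    rw [hFtrue]
    cases hD0 : DK.filter (fun x => oddPart x == 0) with
    | nil => rfl
    | cons z rest =>
      have hz0 : z = 0 := hall0 z (hD0 ▸ List.mem_cons_self ..)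
      have hrest : rest = [] := by
        cases hrest : rest with
        | nil => rfl
        | cons w r =>
          exfalso
          have hw0 : w = 0 := hall0 w (by
            rw [hD0, hrest]
            exact List.mem_cons_of_mem _ (List.mem_cons_self ..))
          rw [hD0] at hD0nd
          rcases List.nodup_cons.mp hD0nd with ⟨hzn, _⟩
          apply hzn
          rw [hrest, hz0, ← hw0]
          exact List.mem_cons_self ..
      rw [hz0, hrest]
      exact (loopH_zero f).symm
  · -- a nonzero chain
    have hs0 : s ≠ 0 := ne_zero_of_oddPart_ne_zero (hso ▸ ho0)
    have hood : o % 2 ≠ 0 := hso ▸ oddPart_odd hs0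
    set p := fun x : Int => oddPart x == o with hp
    set E := S.filter p with hE
    have hEmem : ∀ x ∈ E, oddPart x = o := by
      intro x hx
      have := (List.mem_filter.mp hx).2
      simpa [hp] using this
    have hx0E : ∀ x ∈ E, x ≠ 0 := by
      intro x hx h0
      exact ho0 (by rw [← hEmem x hx, h0, oddPart_zero])
    have hEpow : ∀ x ∈ E, ∃ k : Nat, x = o * 2 ^ k := by
      intro x hx
      rw [← hEmem x hx]
      exact oddPart_rep (hx0E x hx)
    have hE0 : (0 : Int) ∉ E := fun h => hx0E 0 h rfl
    have hEpair : E.Pairwise (fun a b => |a| ≤ |b|) :=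
      List.Pairwise.sublist (List.filter_sublist) (PySem.List.sorted_pairwise arr _)
    have hties : ∀ a ∈ E, ∀ b ∈ E, |a| = |b| → a = b := fun a ha b hb h =>
      chain_eq_of_abs_eq ho0 (hEpow a ha) (hEpow b hb) h
    have hF : loopF E f = loopG (PySem.Set.ofList E) f := by
      apply loopFG E.length E f le_rfl hEpair hties hE0
        (fun w _ => Int.natCast_nonneg _)
      intro x hx
      have hpx : p x = true := (List.mem_filter.mp hx).2
      rw [hE, List.count_filter hpx]
    set C := PySem.Set.ofList E with hC
    have hCE : C = (PySem.Set.ofList S).filter p := by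
      rw [hC, hE, ← ofList_filter]
    have hCsub : C.Sublist E := ofList_sublist E
    have hsE : s ∈ E := List.mem_filter.mpr ⟨hsS, by simp [hp, hso]⟩
    have hsC : s ∈ C := (PySem.Set.mem_ofList ..).mpr hsE
    have hCnd : C.Nodup := PySem.Set.nodup_ofList ..
    have hCpow : ∀ u ∈ C, ∃ k : Nat, u = o * 2 ^ k := fun u hu => hEpow u (hCsub.subset hu)
    have hCpair : C.Pairwise (fun a b => |a| < |b|) := by
      apply pairwise_strengthen ((List.Pairwise.sublist hCsub hEpair).and hCnd)
      intro a ha b hb hr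
      rcases lt_or_eq_of_le hr.1 with h | h
      · exact h
      · exact absurd (hties a (hCsub.subset ha) b (hCsub.subset hb) h) hr.2
    have hCh3 : ∀ u ∈ C, 2 * u ∈ C ∨ f (2 * u) = 0 := by
      intro u hu
      by_cases hm : (2 * u) ∈ S
      · left
        have h2E : 2 * u ∈ E := List.mem_filter.mpr ⟨hm, by
          have h4 : oddPart u = o := hEmem u (hCsub.subset hu)
          simp [hp, oddPart_two_mul, h4]⟩
        exact (PySem.Set.mem_ofList ..).mpr h2E
      · right
        show ((S.count (2 * u) : Nat) : Int) = 0
        rw [List.count_eq_zero.mpr hm]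
        rfl
    have hCnn : ∀ u ∈ C, 0 ≤ f u := fun u _ => Int.natCast_nonneg _
    obtain ⟨x, t, hCc⟩ : ∃ x t, C = x :: t := by
      cases hC2 : C with
      | nil => rw [hC2] at hsC; cases hsC
      | cons x t => exact ⟨x, t, rfl⟩
    -- the H side list is exactly the reverse of C
    have hDperm : (DK.filter p).Perm C := by
      have h1 : (DK.filter p).Perm ((PySem.Set.ofList arr).filter p) := hDKperm.filter p
      have h2 : ((PySem.Set.ofList arr).filter p).Perm ((PySem.Set.ofList S).filter p) := by
        apply List.Perm.filter
        apply (List.perm_ext_iff_of_nodup (PySem.Set.nodup_ofList ..) (PySem.Set.nodup_ofList ..)).mpr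
        intro a
        rw [PySem.Set.mem_ofList, PySem.Set.mem_ofList]
        exact (hperm.mem_iff).symm
      rw [hCE]
      exact h1.trans h2
    have hDmemE : ∀ u ∈ DK.filter p, u ∈ E := fun u hu => hCsub.subset (hDperm.subset hu)
    have hDnd : (DK.filter p).Nodup := (hDperm.nodup_iff).mpr hCnd
    have hDpair : (DK.filter p).Pairwise (fun a b => |b| < |a|) := by
      have h1 : (DK.filter p).Pairwise (fun a b => |b| ≤ |a|) :=
        List.Pairwise.sublist (List.filter_sublist) (PySem.List.sorted_pairwise_rev _ _)
      apply pairwise_strengthen (h1.and hDnd)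
      intro a ha b hb hr
      rcases lt_or_eq_of_le hr.1 with h | h
      · exact h
      · exact absurd ((hties b (hDmemE b hb) a (hDmemE a ha) h).symm) hr.2
    have hCrevpair : (C.reverse).Pairwise (fun a b => |b| < |a|) :=
      List.pairwise_reverse.mpr hCpair
    have hDrev : DK.filter p = C.reverse :=
      strict_sorted_unique (fun a b h1 h2 => by omega)
        (hDperm.trans (List.reverse_perm C).symm) hDpair hCrevpair
    obtain ⟨x2, t2, hRc⟩ : ∃ x2 t2, C.reverse = x2 :: t2 := by
      cases hR2 : C.reverse with
      | nil =>
        exfalso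
        have := List.reverse_eq_nil_iff.mp hR2
        rw [this] at hsC
        cases hsC
      | cons x2 t2 => exact ⟨x2, t2, rfl⟩
    have hRmemC : ∀ u ∈ x2 :: t2, u ∈ C := by
      intro u hu
      rw [← hRc] at hu
      exact List.mem_reverse.mp hu
    have hHx : loopH (x2 :: t2) f = ok (f x2) 0 (pcD f x2 t2) := by
      apply loopH_chain o hood t2 x2 f
      · exact fun u hu => hCpow u (hRmemC u hu)
      · exact hRc ▸ hCrevpair
      · intro u hu z hz
        by_cases hm : z ∈ S
        · left
          have hoz : oddPart z = o := by
            have h4 : oddPart u = o := hEmem u (hCsub.subset (hRmemC u hu))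
            rw [hz, oddPart_two_mul] at h4
            exact h4
          have hzE : z ∈ E := List.mem_filter.mpr ⟨hm, by simp [hp, hoz]⟩
          have hzC : z ∈ C := (PySem.Set.mem_ofList ..).mpr hzE
          rw [← hRc]
          exact List.mem_reverse.mpr hzC
        · right
          show ((S.count z : Nat) : Int) = 0
          rw [List.count_eq_zero.mpr hm]
          rfl
      · exact fun u _ => Int.natCast_nonneg _
    have hGx : loopG (x :: t) f = ok (f x) 0 (pc f x t) := by
      apply loopG_chain o ho0 t x f
      · exact hCc ▸ hCpow
      · exact hCc ▸ hCpair
      · exact hCc ▸ hCh3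
      · exact hCc ▸ hCnn
    have hfx_nn : (0 : Int) ≤ f x := Int.natCast_nonneg _
    have hfx2_nn : (0 : Int) ≤ f x2 := Int.natCast_nonneg _
    calc loopF E f = loopG (x :: t) f := by rw [hF, hCc]
      _ = ok (f x) 0 (pc f x t) := hGx
      _ = ok 0 0 (fullC f (x :: t)) := by
            show _ = ok 0 0 (f x :: pc f x t)
            show _ = (if (0:Int) > f x then false else ok (f x - 0) 0 (pc f x t))
            rw [if_neg (by omega), show f x - 0 = f x by ring]
      _ = ok 0 0 ((fullC f (x :: t)).reverse) :=
            ok_reverse _ 0 0 le_rfl le_rfl (fullC_nonneg (x :: t) f (hCc ▸ hCnn))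
      _ = ok 0 0 (fullD f (x2 :: t2)) := by
            rw [← full_rev t x f, ← hCc, hRc]
      _ = ok (f x2) 0 (pcD f x2 t2) := by
            show ok 0 0 (f x2 :: pcD f x2 t2) = _
            show (if (0:Int) > f x2 then false else ok (f x2 - 0) 0 (pcD f x2 t2)) = _
            rw [if_neg (by omega), show f x2 - 0 = f x2 by ring]
      _ = loopH (x2 :: t2) f := hHx.symm
      _ = loopH (DK.filter p) f := by rw [hDrev, hRc]

-- ===== VERDICT (by name: the statement is the Claim_ definition above) =====
theorem process_spec : Claim_equal_process := by
  intro arr _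
  unfold Spec_process
  exact process_eq arr
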